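-- pv_equiv track=rewrite | github.com/reyco2000/Vintage-Image-Viewer | vintage_image_viewer.py | _decompress_packbits
-- ===== SOURCE A (Python) =====
-- def _decompress_packbits(data, width, height):
--     """Decompress PackBits compressed data (used in MacPaint)"""
--     pixels = []
--     bits = []
--     i = 0
--
--     while i < len(data) and len(bits) < width * height:
--         if i >= len(data):
--             break
--
--         flag = data[i]
--
--         if flag < 128:
--             # Literal run: copy next (flag + 1) bytes
--             count = flag + 1
--             i += 1
--             for j in range(count):
--                 if i < len(data):
--                     byte = data[i]
--                     # Expand bits
--                     for bit in range(7, -1, -1):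
--                         bits.append(1 if (byte >> bit) & 1 else 0)
--                     i += 1
--         elif flag > 128:
--             # Repeat run: repeat next byte (257 - flag) times
--             count = 257 - flag
--             i += 1
--             if i < len(data):
--                 byte = data[i]
--                 for _ in range(count):
--                     # Expand bits
--                     for bit in range(7, -1, -1):
--                         bits.append(1 if (byte >> bit) & 1 else 0)
--                 i += 1
--         else:
--             # flag == 128: no-op
--             i += 1
--
--     # Convert bits to pixels (0 = white, 1 = black)
--     pixels = [255 if bit == 0 else 0 for bit in bits[:width * height]]
--
--     # Pad if needed
--     while len(pixels) < width * height:
--         pixels.append(255)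
--
--     return pixels[:width * height]
-- ===== SOURCE B (Python) =====
-- def _decompress_packbits(data, width, height):
--     """Decompress PackBits compressed data (used in MacPaint)"""
--     total = width * height
--     if total <= 0:
--         return []
--     # Phase 1: PackBits RLE decode into a flat byte buffer.
--     buf = []
--     i = 0
--     n = len(data)
--     while i < n:
--         flag = data[i]
--         i += 1
--         if flag < 128:
--             for _ in range(flag + 1):
--                 if i < n:
--                     buf.append(data[i])
--                     i += 1
--         elif flag > 128:
--             if i < n:
--                 buf.extend([data[i]] * (257 - flag))
--                 i += 1
--         # flag == 128: no-op
--     # Phase 2: expand bytes MSB-first to pixels (bit 0 -> 255, bit 1 -> 0).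
--     pixels = [255 if (b >> k) & 1 == 0 else 0
--               for b in buf for k in range(7, -1, -1)]
--     pixels = pixels[:total]
--     pixels += [255] * (total - len(pixels))
--     return pixels
-- ===== Notes on version B (the rewrite author's own statement) =====
-- stated objective: simpler
-- what changed: A interleaves RLE run handling with per-byte bit expansion and a len(bits) stop condition inside one while loop; B is two independent phases - a pure PackBits byte decode into a flat buffer, then a single comprehension expanding each byte to 8 pixels - with truncation/padding at the end replacing the interleaved stop condition.
import Mathlib
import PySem

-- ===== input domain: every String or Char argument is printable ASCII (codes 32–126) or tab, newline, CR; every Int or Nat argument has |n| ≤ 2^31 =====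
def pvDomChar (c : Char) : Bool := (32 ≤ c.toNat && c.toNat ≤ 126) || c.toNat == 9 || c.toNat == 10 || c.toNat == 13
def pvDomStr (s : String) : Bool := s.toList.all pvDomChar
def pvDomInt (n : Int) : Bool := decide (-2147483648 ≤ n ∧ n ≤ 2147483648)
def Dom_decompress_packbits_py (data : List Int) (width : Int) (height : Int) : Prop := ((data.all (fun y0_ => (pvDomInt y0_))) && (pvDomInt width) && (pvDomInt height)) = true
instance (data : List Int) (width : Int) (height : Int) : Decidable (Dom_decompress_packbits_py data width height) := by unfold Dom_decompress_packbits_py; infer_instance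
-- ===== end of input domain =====

-- B re-decomposes A's interleaved loop into two phases: a pure PackBits byte decode, then one
-- bit-expansion pass with truncation/padding; return value proved equal on all inputs (objective: simpler).

-- ===== PORT A =====

-- bits.append of the 8 bits of `byte`, MSB first (A's inner `for bit in range(7,-1,-1)`)
def pvBitsA (byte : Int) (bits : List Int) : List Int :=
  (PySem.List.pyRange 7 (-1) (-1)).foldl
    (fun bs bit => bs ++ [if PySem.Int.band (byte >>> bit.toNat) 1 ≠ 0 then (1 : Int) else 0]) bits

-- A's while loop; i strictly increases each iteration, so fuel = data.length suffices
def pvLoopA (data : List Int) (target : Int) : Nat → Nat → List Int → List Int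
  | 0, _, bits => bits
  | fuel + 1, i, bits =>
    if i < data.length ∧ (bits.length : Int) < target then
      let flag := data.getD i 0
      if flag < 128 then
        let st := (List.range (flag + 1).toNat).foldl
          (fun (st : Nat × List Int) _ =>
            if st.1 < data.length then (st.1 + 1, pvBitsA (data.getD st.1 0) st.2) else st)
          (i + 1, bits)
        pvLoopA data target fuel st.1 st.2
      else if flag > 128 then
        if i + 1 < data.length then
          pvLoopA data target fuel (i + 2)
            ((List.range (257 - flag).toNat).foldl
              (fun bs _ => pvBitsA (data.getD (i + 1) 0) bs) bits)
        else pvLoopA data target fuel (i + 1) bits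
      else pvLoopA data target fuel (i + 1) bits
    else bits

def decompress_packbits_py (data : List Int) (width : Int) (height : Int) : List Int :=
  let wh := width * height
  let bits := pvLoopA data wh data.length 0 []
  let pixels := (PySem.List.slice bits none (some wh)).map (fun bit => if bit = 0 then (255 : Int) else 0)
  let pixels := pixels ++ List.replicate (wh - pixels.length).toNat 255
  PySem.List.slice pixels none (some wh)

-- ===== PORT B =====

-- phase 1: PackBits byte decode (B's first while loop; fuel as in pvLoopA)
def pvRunsB (data : List Int) : Nat → Nat → List Int → List Int
  | 0, _, buf => buf
  | fuel + 1, i, buf =>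
    if i < data.length then
      let flag := data.getD i 0
      if flag < 128 then
        let st := (List.range (flag + 1).toNat).foldl
          (fun (st : Nat × List Int) _ =>
            if st.1 < data.length then (st.1 + 1, st.2 ++ [data.getD st.1 0]) else st)
          (i + 1, buf)
        pvRunsB data fuel st.1 st.2
      else if flag > 128 then
        if i + 1 < data.length then
          pvRunsB data fuel (i + 2) (buf ++ List.replicate (257 - flag).toNat (data.getD (i + 1) 0))
        else pvRunsB data fuel (i + 1) buf
      else pvRunsB data fuel (i + 1) buf
    else buf

-- phase 2: one byte -> its 8 pixels, MSB first (bit 0 -> 255, bit 1 -> 0)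
def pvByteToPix (b : Int) : List Int :=
  (PySem.List.pyRange 7 (-1) (-1)).map
    (fun k => if PySem.Int.band (b >>> k.toNat) 1 = 0 then (255 : Int) else 0)

def decompress_packbits_py_alt (data : List Int) (width : Int) (height : Int) : List Int :=
  let total := width * height
  if total ≤ 0 then []
  else
    let buf := pvRunsB data data.length 0 []
    let pixels := (buf.flatMap pvByteToPix).take total.toNat
    pixels ++ List.replicate (total.toNat - pixels.length) 255

-- ===== PRECONDITION & SPEC =====
def Spec_decompress_packbits_py (data : List Int) (width : Int) (height : Int) (out : List Int) : Prop := out = decompress_packbits_py_alt data width height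
instance (data : List Int) (width : Int) (height : Int) (out : List Int) : Decidable (Spec_decompress_packbits_py data width height out) := by unfold Spec_decompress_packbits_py; infer_instance

-- ===== CLAIM (what is proved, stated in full; the proofs are below) =====
def Claim_equal_decompress_packbits_py : Prop := ∀ (data : List Int) (width : Int) (height : Int), Dom_decompress_packbits_py data width height → Spec_decompress_packbits_py data width height (decompress_packbits_py data width height)

-- ===== LEMMAS AND PROOFS =====

-- the 8 bits A appends for one byte
def pvBits8 (byte : Int) : List Int :=
  (PySem.List.pyRange 7 (-1) (-1)).map
    (fun bit => if PySem.Int.band (byte >>> bit.toNat) 1 ≠ 0 then (1 : Int) else 0)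

theorem pvBitsA_eq (byte : Int) (bits : List Int) : pvBitsA byte bits = bits ++ pvBits8 byte := by
  simpa [pvBitsA, pvBits8] using
    PySem.List.foldl_append_singleton_eq_map
      (l := PySem.List.pyRange 7 (-1) (-1))
      (f := fun bit => if PySem.Int.band (byte >>> bit.toNat) 1 ≠ 0 then (1 : Int) else 0)
      (acc := bits)

theorem pvByteToPix_eq (b : Int) :
    pvByteToPix b = (pvBits8 b).map (fun bit => if bit = 0 then (255 : Int) else 0) := by
  simp only [pvByteToPix, pvBits8, List.map_map]
  refine List.map_congr_left (fun k _ => ?_)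
  simp

-- A's full-decode loop (A's while loop without the len(bits) < target condition)
def pvDecode (data : List Int) : Nat → Nat → List Int → List Int
  | 0, _, bits => bits
  | fuel + 1, i, bits =>
    if i < data.length then
      let flag := data.getD i 0
      if flag < 128 then
        let st := (List.range (flag + 1).toNat).foldl
          (fun (st : Nat × List Int) _ =>
            if st.1 < data.length then (st.1 + 1, pvBitsA (data.getD st.1 0) st.2) else st)
          (i + 1, bits)
        pvDecode data fuel st.1 st.2
      else if flag > 128 then
        if i + 1 < data.length then
          pvDecode data fuel (i + 2)
            ((List.range (257 - flag).toNat).foldl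
              (fun bs _ => pvBitsA (data.getD (i + 1) 0) bs) bits)
        else pvDecode data fuel (i + 1) bits
      else pvDecode data fuel (i + 1) bits
    else bits

theorem pvFoldA_prefix (data : List Int) (l : List Nat) (st : Nat × List Int) :
    st.2 <+: (l.foldl (fun (st : Nat × List Int) _ =>
      if st.1 < data.length then (st.1 + 1, pvBitsA (data.getD st.1 0) st.2) else st) st).2 := by
  induction l generalizing st with
  | nil => exact List.prefix_rfl
  | cons x xs ih =>
    refine List.IsPrefix.trans ?_ (ih _)
    by_cases h : st.1 < data.length <;> simp [h, pvBitsA_eq]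

theorem pvDecode_prefix (data : List Int) (fuel : Nat) :
    ∀ i bits, bits <+: pvDecode data fuel i bits := by
  induction fuel with
  | zero => intro i bits; exact List.prefix_rfl
  | succ fuel ih =>
    intro i bits
    simp only [pvDecode]
    split_ifs with h1 h2 h3 h4
    · exact List.IsPrefix.trans
        (pvFoldA_prefix data (List.range (data.getD i 0 + 1).toNat) (i + 1, bits)) (ih _ _)
    · refine List.IsPrefix.trans ?_ (ih _ _)
      have : ∀ (l : List Nat) (bs : List Int),
          bs <+: l.foldl (fun bs _ => pvBitsA (data.getD (i + 1) 0) bs) bs := by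
        intro l
        induction l with
        | nil => intro bs; exact List.prefix_rfl
        | cons x xs ih2 =>
          intro bs
          exact List.IsPrefix.trans (by simp [pvBitsA_eq]) (ih2 _)
      exact this _ _
    · exact ih _ _
    · exact ih _ _
    · exact List.prefix_rfl

-- A's loop either equals the full decode, or stopped early with ≥ target bits, a prefix of the full decode
theorem pvLoopA_cases (data : List Int) (target : Int) (fuel : Nat) :
    ∀ i bits, pvLoopA data target fuel i bits = pvDecode data fuel i bits ∨
      (target ≤ ((pvLoopA data target fuel i bits).length : Int) ∧
        pvLoopA data target fuel i bits <+: pvDecode data fuel i bits) := by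
  induction fuel with
  | zero => intro i bits; exact Or.inl rfl
  | succ fuel ih =>
    intro i bits
    by_cases hi : i < data.length
    · by_cases hb : (bits.length : Int) < target
      · simp only [pvLoopA, pvDecode, if_pos (And.intro hi hb), if_pos hi]
        split_ifs with h2 h3 h4
        · exact ih _ _
        · exact ih _ _
        · exact ih _ _
        · exact ih _ _
      · have he : pvLoopA data target (fuel + 1) i bits = bits := by
          simp only [pvLoopA]
          rw [if_neg]
          intro h; exact hb h.2
        rw [he]
        exact Or.inr ⟨by omega, pvDecode_prefix data _ _ _⟩
    · have he : pvLoopA data target (fuel + 1) i bits = bits := by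
        simp only [pvLoopA]
        rw [if_neg]
        intro h; exact hi h.1
      have hd : pvDecode data (fuel + 1) i bits = bits := by
        simp only [pvDecode]
        rw [if_neg hi]
      rw [he, hd]
      exact Or.inl rfl

theorem pvFlatMap_replicate (b : Int) (n : Nat) :
    (List.replicate n b).flatMap pvBits8 = (List.range n).flatMap (fun _ => pvBits8 b) := by
  induction n with
  | zero => simp
  | succ n ih => simp [List.replicate_succ', List.range_succ, ih]

theorem pvFoldPair (data : List Int) (l : List Nat) :
    ∀ (i : Nat) (buf : List Int),
      l.foldl (fun (st : Nat × List Int) _ =>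
        if st.1 < data.length then (st.1 + 1, pvBitsA (data.getD st.1 0) st.2) else st)
        (i, buf.flatMap pvBits8)
      = ((l.foldl (fun (st : Nat × List Int) _ =>
          if st.1 < data.length then (st.1 + 1, st.2 ++ [data.getD st.1 0]) else st) (i, buf)).1,
         (l.foldl (fun (st : Nat × List Int) _ =>
          if st.1 < data.length then (st.1 + 1, st.2 ++ [data.getD st.1 0]) else st) (i, buf)).2.flatMap pvBits8) := by
  induction l with
  | nil => intro i buf; rfl
  | cons x xs ih =>
    intro i buf
    simp only [List.foldl_cons]
    by_cases h : i < data.length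
    · simp only [if_pos h]
      rw [pvBitsA_eq, show buf.flatMap pvBits8 ++ pvBits8 (data.getD i 0)
            = (buf ++ [data.getD i 0]).flatMap pvBits8 by simp]
      exact ih _ _
    · simp only [if_neg h]
      exact ih _ _

-- A's full decode = B's byte decode, bit-expanded
theorem pvDecode_eq_runs (data : List Int) (fuel : Nat) :
    ∀ i buf, pvDecode data fuel i (buf.flatMap pvBits8)
      = (pvRunsB data fuel i buf).flatMap pvBits8 := by
  induction fuel with
  | zero => intro i buf; rfl
  | succ fuel ih =>
    intro i buf
    simp only [pvDecode, pvRunsB]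
    by_cases hi : i < data.length
    · simp only [if_pos hi]
      split_ifs with h2 h3 h4
      · rw [pvFoldPair]; exact ih _ _
      · rw [show (List.range (257 - data.getD i 0).toNat).foldl
              (fun bs _ => pvBitsA (data.getD (i + 1) 0) bs) (buf.flatMap pvBits8)
            = (buf ++ List.replicate (257 - data.getD i 0).toNat (data.getD (i + 1) 0)).flatMap pvBits8 by
          simp only [pvBitsA_eq]
          rw [PySem.List.foldl_append_eq_flatMap]
          simp [pvFlatMap_replicate]]
        exact ih _ _
      · exact ih _ _
      · exact ih _ _
    · simp [hi]

-- ===== VERDICT (by name: the statement is the Claim_ definition above) =====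
theorem decompress_packbits_py_spec : Claim_equal_decompress_packbits_py := by
  intro data width height _
  unfold Spec_decompress_packbits_py decompress_packbits_py decompress_packbits_py_alt
  set wh := width * height with hwh
  by_cases hpos : wh ≤ 0
  · -- target ≤ 0: A's loop never runs, everything collapses to []
    have hbits : pvLoopA data wh data.length 0 [] = [] := by
      cases hf : data.length with
      | zero => simp [pvLoopA]
      | succ n =>
        simp only [pvLoopA]
        rw [if_neg]
        rintro ⟨-, h⟩
        simp at h; omega
    have hsl : ∀ (b : Int), PySem.List.slice ([] : List Int) none (some b) = [] := by
      intro b; simp [PySem.List.slice]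
    simp only [hbits, if_pos hpos, hsl, List.map_nil, List.nil_append, List.length_nil,
      Nat.cast_zero, sub_zero]
    rw [show wh.toNat = 0 from by omega]
    exact hsl wh
  · -- target > 0
    simp only [if_neg hpos]
    have hwh0 : 0 < wh := by omega
    set t := wh.toNat with ht
    have hB : (pvRunsB data data.length 0 []).flatMap pvBits8 = pvDecode data data.length 0 [] :=
      (pvDecode_eq_runs data data.length 0 []).symm
    set f := pvDecode data data.length 0 [] with hf
    set a := pvLoopA data wh data.length 0 [] with ha
    have hflat : (pvRunsB data data.length 0 []).flatMap pvByteToPix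
        = f.map (fun bit => if bit = 0 then (255 : Int) else 0) := by
      rw [← hB,
        show pvByteToPix = (fun b => (pvBits8 b).map (fun bit => if bit = 0 then (255 : Int) else 0))
          from funext pvByteToPix_eq,
        ← List.map_flatMap]
    rw [hflat]
    have hsliceA : PySem.List.slice a none (some wh) = a.take t := by
      rw [PySem.List.slice_to _ (le_of_lt hwh0)]
    rw [hsliceA]
    rcases pvLoopA_cases data wh data.length 0 [] with heq | ⟨hlen, hpre⟩
    · -- A ran to completion: a = f
      rw [← hf] at heq
      rw [← ha] at heq
      rw [heq, ← List.map_take]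
      set p := (f.take t).map (fun bit => if bit = 0 then (255 : Int) else 0) with hp
      have hplen : p.length = min t f.length := by simp [hp]
      have hrep : (wh - (p.length : Int)).toNat = t - p.length := by omega
      rw [hrep]
      have hlenall : (p ++ List.replicate (t - p.length) (255:Int)).length = t := by
        simp [hplen]
      rw [PySem.List.slice_to _ (le_of_lt hwh0), ← ht]
      exact List.take_of_length_le (le_of_eq hlenall)
    · -- A stopped early with ≥ wh bits, a prefix of f: the first t entries agree, no padding
      rw [← hf] at hpre
      rw [← ha] at hlen hpre
      have hta : t ≤ a.length := by omega
      obtain ⟨r, hr⟩ := hpre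
      have htake : a.take t = f.take t := by
        rw [← hr, List.take_append_of_le_length hta]
      rw [htake, ← List.map_take]
      set p := (f.take t).map (fun bit => if bit = 0 then (255 : Int) else 0) with hp
      have hplen : p.length = t := by
        simp [hp]
        have : t ≤ f.length := le_trans hta (by rw [← hr]; simp)
        omega
      have h1 : (wh - (p.length : Int)).toNat = 0 := by omega
      have h2 : t - p.length = 0 := by omega
      rw [h1, h2]
      simp only [List.replicate_zero, List.append_nil]
      rw [PySem.List.slice_to _ (le_of_lt hwh0), ← ht]
      exact List.take_of_length_le (le_of_eq hplen)
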